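-- pv_equiv track=rewrite | github.com/ma1112/codejam2018 | juggler.py | getCombinations2
-- ===== SOURCE A (Python) =====
-- import itertools
--
-- def getCombinations2(saws):
--     rs = ["R" for i in range(saws[0])]
--     bs = ["B" for i in range(saws[1])]
--     R = saws[0]
--     B = saws[1]
--     letters = rs + bs
--     combinations = set()
--     lastOkLength = 1
--
--     for L in range(0, len(letters) + 1):
--         for subset in itertools.combinations(letters, L):
--             if R + B < len(subset) or len(subset) > lastOkLength+2: return combinations
--             thisComb = (subset.count("R") , subset.count("B"))
--             if thisComb not in combinations and thisComb[0]<=R and thisComb[1] <= B: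
--                 combinations.add(thisComb)
--                 R -= thisComb[0]
--                 B -= thisComb[1]
--                 lastOkLength = len(subset)
--     return combinations
-- ===== SOURCE B (Python) =====
-- def getCombinations2(saws):
--     # Per-length enumeration of the distinct (r, b) count pairs in decreasing-r
--     # order (the order of their first appearance in A's subset enumeration),
--     # instead of enumerating all C(R+B, L) letter subsets per length.
--     R = saws[0]
--     B = saws[1]
--     R0 = max(R, 0)
--     B0 = max(B, 0)
--     combinations = set()
--     lastOkLength = 1
--     for L in range(0, R0 + B0 + 1):
--         if R + B < L or L > lastOkLength + 2:
--             break
--         for r in range(min(L, R0), max(0, L - B0) - 1, -1):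
--             t = (r, L - r)
--             if t not in combinations and r <= R and L - r <= B:
--                 combinations.add(t)
--                 R -= r
--                 B -= L - r
--                 lastOkLength = L
--     return combinations
-- ===== Notes on version B (the rewrite author's own statement) =====
-- stated objective: alternative
-- what changed: B replaces A's enumeration of all C(R+B, L) letter subsets per length (itertools.combinations over the letter multiset, counting each tuple) by a direct descending loop over the at most L+1 distinct (r, b) count pairs of each length, which is exactly the order in which new pairs first appear in A's enumeration; the gate re-checks A performs on duplicate subsets are provably redundant.
import Mathlib
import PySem

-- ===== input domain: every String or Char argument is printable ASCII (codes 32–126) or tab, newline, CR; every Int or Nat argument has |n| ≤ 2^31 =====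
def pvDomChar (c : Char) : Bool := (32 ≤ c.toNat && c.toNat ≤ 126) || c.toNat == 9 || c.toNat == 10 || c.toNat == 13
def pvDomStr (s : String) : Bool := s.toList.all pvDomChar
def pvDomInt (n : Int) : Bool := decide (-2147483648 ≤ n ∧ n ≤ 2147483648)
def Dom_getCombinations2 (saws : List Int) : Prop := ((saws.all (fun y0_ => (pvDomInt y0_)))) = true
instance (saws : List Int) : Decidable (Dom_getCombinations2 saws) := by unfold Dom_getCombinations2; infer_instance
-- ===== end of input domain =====

-- B replaces A's enumeration of all letter subsets per length by a direct
-- descending loop over the distinct (r, b) count pairs of each length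
-- (objective: alternative algorithm; it avoids building the letter list and
-- the per-subset counting entirely).

-- ===== PORT A =====

/-- Loop state shared by both ports: stop flag (A's `return` / B's `break`),
    the set of count pairs, and the mutable `R`, `B`, `lastOkLength`. -/
structure PvSt where
  stop : Bool
  combos : List (Int × Int)
  R : Int
  B : Int
  last : Int
deriving Repr, DecidableEq

/-- Body of A's inner loop (the early `return` becomes the `stop` flag;
    once set, the remaining iterations do nothing and `combos` is returned). -/
def pvStepA (st : PvSt) (subset : List String) : PvSt :=
  if st.stop then st
  else if st.R + st.B < (subset.length : Int) ∨ (subset.length : Int) > st.last + 2 then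
    { st with stop := true }
  else
    let t : Int × Int := ((subset.count "R" : Int), (subset.count "B" : Int))
    if t ∉ st.combos ∧ t.1 ≤ st.R ∧ t.2 ≤ st.B then
      ⟨st.stop, PySem.Set.add st.combos t, st.R - t.1, st.B - t.2, (subset.length : Int)⟩
    else st

/-- `for subset in itertools.combinations(letters, L): st := pvStepA st subset`,
    fused with the (lazy) generator: `g` is the accumulated prefix, and once the
    `return` flag is set the remaining subsets are skipped (they would be no-ops;
    `pvFoldCombs_eq` below proves this equal to folding over `pvCombs`). -/
def pvFoldCombs (g : List String → List String) : Nat → List String → PvSt → PvSt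
  | 0, _, st => pvStepA st (g [])
  | _ + 1, [], st => st
  | L + 1, x :: xs, st =>
    if st.stop then st
    else pvFoldCombs g (L + 1) xs (pvFoldCombs (fun s => g (x :: s)) L xs st)

def getCombinations2 (saws : List Int) : List (Int × Int) :=
  match PySem.List.pyGet? saws 0, PySem.List.pyGet? saws 1 with
  | some s0, some s1 =>
      -- ["R" for i in range(saws[0])]: range(n) has max(n,0) elements, toNat is exact here
      let letters := List.replicate s0.toNat "R" ++ List.replicate s1.toNat "B"
      ((List.range (letters.length + 1)).foldl
        (fun st L => pvFoldCombs id L letters st)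
        ⟨false, [], s0, s1, 1⟩).combos
  | _, _ => []   -- IndexError (len(saws) < 2); excluded by Pre_

-- ===== PORT B =====

/-- B's loop state (stop flag = the `break`, the set, `R`, `B`, `lastOkLength`). -/
structure PvStB where
  stop : Bool
  combos : List (Int × Int)
  R : Int
  B : Int
  last : Int
deriving Repr, DecidableEq

/-- Body of B's inner loop over `r` (no break inside). -/
def pvStepB (L : Int) (st : PvStB) (r : Int) : PvStB :=
  if (r, L - r) ∉ st.combos ∧ r ≤ st.R ∧ L - r ≤ st.B then
    ⟨st.stop, PySem.Set.add st.combos (r, L - r), st.R - r, st.B - (L - r), L⟩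
  else st

/-- Body of B's outer loop over `L` (the `break` becomes the `stop` flag). -/
def pvLenB (R0 B0 : Int) (st : PvStB) (L : Int) : PvStB :=
  if st.stop then st
  else if st.R + st.B < L ∨ L > st.last + 2 then { st with stop := true }
  else (PySem.List.pyRange (min L R0) (max 0 (L - B0) - 1) (-1)).foldl (pvStepB L) st

def getCombinations2_alt (saws : List Int) : List (Int × Int) :=
  match PySem.List.pyGet? saws 0 with
  | none => []   -- IndexError (saws empty); excluded by Pre_
  | some s0 =>
    match PySem.List.pyGet? saws 1 with
    | none => []   -- IndexError (len(saws) < 2); excluded by Pre_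
    | some s1 =>
        let R0 := max s0 0
        let B0 := max s1 0
        ((PySem.List.pyRange 0 (R0 + B0 + 1) 1).foldl (pvLenB R0 B0)
          ⟨false, [], s0, s1, 1⟩).combos

-- ===== PRECONDITION & SPEC =====

/-- A reads saws[0] and saws[1]; on shorter lists it raises IndexError. -/
def Pre_getCombinations2 (saws : List Int) : Prop := 2 ≤ saws.length
instance (saws : List Int) : Decidable (Pre_getCombinations2 saws) := by
  unfold Pre_getCombinations2; infer_instance

def pvWitness_getCombinations2 : List Int := [2, 2]

def Spec_getCombinations2 (saws : List Int) (out : List (Int × Int)) : Prop :=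
  out = getCombinations2_alt saws
instance (saws : List Int) (out : List (Int × Int)) : Decidable (Spec_getCombinations2 saws out) := by
  unfold Spec_getCombinations2; infer_instance

-- ===== CLAIM (what is proved, stated in full; the proofs are below) =====
def Claim_equal_getCombinations2 : Prop := ∀ (saws : List Int), Dom_getCombinations2 saws → Pre_getCombinations2 saws → Spec_getCombinations2 saws (getCombinations2 saws)

-- ===== LEMMAS AND PROOFS =====

/-- Proof-side copy of B's loop bodies over A's state type `PvSt` (identical
    field-for-field; `pvMk` is the isomorphism to `PvStB`). -/
def pvStepBSh (L : Int) (st : PvSt) (r : Int) : PvSt :=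
  if (r, L - r) ∉ st.combos ∧ r ≤ st.R ∧ L - r ≤ st.B then
    ⟨st.stop, PySem.Set.add st.combos (r, L - r), st.R - r, st.B - (L - r), L⟩
  else st

def pvLenBSh (R0 B0 : Int) (st : PvSt) (L : Int) : PvSt :=
  if st.stop then st
  else if st.R + st.B < L ∨ L > st.last + 2 then { st with stop := true }
  else (PySem.List.pyRange (min L R0) (max 0 (L - B0) - 1) (-1)).foldl (pvStepBSh L) st

def pvMk (st : PvSt) : PvStB := ⟨st.stop, st.combos, st.R, st.B, st.last⟩

theorem pvStepB_mk (L : Int) (st : PvSt) (r : Int) :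
    pvStepB L (pvMk st) r = pvMk (pvStepBSh L st r) := by
  unfold pvStepB pvStepBSh pvMk
  split_ifs <;> rfl

theorem pvFoldStepB_mk (L : Int) (l : List Int) (st : PvSt) :
    l.foldl (pvStepB L) (pvMk st) = pvMk (l.foldl (pvStepBSh L) st) := by
  induction l generalizing st with
  | nil => rfl
  | cons r l ih => rw [List.foldl_cons, List.foldl_cons, pvStepB_mk, ih]

theorem pvLenB_mk (R0 B0 : Int) (st : PvSt) (L : Int) :
    pvLenB R0 B0 (pvMk st) L = pvMk (pvLenBSh R0 B0 st L) := by
  obtain ⟨stop, combos, R, B, last⟩ := st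
  show pvLenB R0 B0 ⟨stop, combos, R, B, last⟩ L = _
  unfold pvLenB pvLenBSh
  dsimp only [pvMk]
  split_ifs with h1 h2
  · rfl
  · rfl
  · exact pvFoldStepB_mk L _ ⟨stop, combos, R, B, last⟩

theorem pvFoldLenB_mk (R0 B0 : Int) (l : List Int) (st : PvSt) :
    l.foldl (pvLenB R0 B0) (pvMk st) = pvMk (l.foldl (pvLenBSh R0 B0) st) := by
  induction l generalizing st with
  | nil => rfl
  | cons L l ih => rw [List.foldl_cons, List.foldl_cons, pvLenB_mk, ih]

/-- `itertools.combinations(xs, L)`: all length-`L` subsequences, in the order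
    itertools yields them (those containing the first element first). -/
def pvCombs : Nat → List String → List (List String)
  | 0, _ => [[]]
  | _ + 1, [] => []
  | L + 1, x :: xs => ((pvCombs L xs).map (x :: ·)) ++ pvCombs (L + 1) xs

theorem pvStepA_frozen' {st : PvSt} (h : st.stop = true) (l : List (List String)) :
    l.foldl pvStepA st = st := by
  induction l with
  | nil => rfl
  | cons x l ih => simpa [pvStepA, h] using ih

/-- The fused enumeration equals the fold over the subset list. -/
theorem pvFoldCombs_eq (g : List String → List String) (L : Nat) (xs : List String)
    (st : PvSt) :
    pvFoldCombs g L xs st = ((pvCombs L xs).map g).foldl pvStepA st := by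
  induction g, L, xs, st using pvFoldCombs.induct with
  | case1 xs g st => cases xs <;> rfl
  | case2 g L st => rfl
  | case3 g L x xs st hstop =>
    rw [pvFoldCombs, if_pos hstop, pvCombs, List.map_append, List.foldl_append,
      pvStepA_frozen' hstop, pvStepA_frozen' hstop]
  | case4 g L x xs st hstop ih1 ih2 =>
    rw [pvFoldCombs, if_neg hstop, pvCombs, List.map_append, List.foldl_append,
      List.map_map, show (g ∘ fun s => x :: s) = (fun s => g (x :: s)) from rfl,
      ← ih1, ← ih2]

/-- Count pair of a subset, as A computes it. -/
def pvCnt (s : List String) : Int × Int := ((s.count "R" : Int), (s.count "B" : Int))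

/-- A's inner-loop body at the level of count pairs (`L` = the subset length). -/
def pvStepT (L : Int) (st : PvSt) (t : Int × Int) : PvSt :=
  if st.stop then st
  else if st.R + st.B < L ∨ L > st.last + 2 then { st with stop := true }
  else if t ∉ st.combos ∧ t.1 ≤ st.R ∧ t.2 ≤ st.B then
    ⟨st.stop, PySem.Set.add st.combos t, st.R - t.1, st.B - t.2, L⟩
  else st

/-- First occurrences of a list, in order. -/
def pvFirstOccs {α : Type} [DecidableEq α] : List α → List α
  | [] => []
  | x :: xs => x :: pvFirstOccs (xs.filter (· ≠ x))
  termination_by l => l.length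
  decreasing_by
    simp only [List.length_cons, List.length_unattach, Nat.lt_succ_iff]
    exact le_trans (List.length_filter_le _ _) (by simp)

/-- States equal except possibly the stop flag. -/
def pvEqCore (s t : PvSt) : Prop :=
  s.combos = t.combos ∧ s.R = t.R ∧ s.B = t.B ∧ s.last = t.last

/-- Equivalence up to the stop flag, which may differ once `R + B < L`
    (then neither side can add anything at length `L` any more). -/
def pvRel (L : Int) (s t : PvSt) : Prop :=
  pvEqCore s t ∧ (s.stop = t.stop ∨ s.R + s.B < L)

theorem pvEqCore_refl (s : PvSt) : pvEqCore s s := ⟨rfl, rfl, rfl, rfl⟩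

theorem pvEqCore_symm {s t : PvSt} (h : pvEqCore s t) : pvEqCore t s := by
  obtain ⟨a1, a2, a3, a4⟩ := h; exact ⟨a1.symm, a2.symm, a3.symm, a4.symm⟩

theorem pvEqCore_trans {s t u : PvSt} (h1 : pvEqCore s t) (h2 : pvEqCore t u) :
    pvEqCore s u := by
  obtain ⟨a1, a2, a3, a4⟩ := h1; obtain ⟨b1, b2, b3, b4⟩ := h2
  exact ⟨a1.trans b1, a2.trans b2, a3.trans b3, a4.trans b4⟩

theorem pvStepA_eq_stepT (st : PvSt) (s : List String) :
    pvStepA st s = pvStepT (s.length : Int) st (pvCnt s) := rfl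

theorem pvRel_refl (L : Int) (s : PvSt) : pvRel L s s := ⟨pvEqCore_refl s, Or.inl rfl⟩

theorem pvRel_trans {L : Int} {s t u : PvSt} (h1 : pvRel L s t) (h2 : pvRel L t u) :
    pvRel L s u := by
  obtain ⟨c1, d1⟩ := h1; obtain ⟨c2, d2⟩ := h2
  refine ⟨pvEqCore_trans c1 c2, ?_⟩
  rcases d1 with d1 | d1
  · rcases d2 with d2 | d2
    · exact Or.inl (d1.trans d2)
    · exact Or.inr (by obtain ⟨_, h2, h3, _⟩ := c1; omega)
  · exact Or.inr d1

theorem pvRel_mono {L L' : Int} (h : L ≤ L') {s t : PvSt} (hr : pvRel L s t) :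
    pvRel L' s t := by
  obtain ⟨c, d⟩ := hr
  exact ⟨c, d.imp id (fun hl => by omega)⟩

-- combinatorics of pvCombs ---------------------------------------------------

theorem pvCombs_length {L : Nat} {xs : List String} {s : List String}
    (h : s ∈ pvCombs L xs) : s.length = L := by
  induction xs generalizing L s with
  | nil =>
    match L with
    | 0 => simp only [pvCombs, List.mem_singleton] at h; subst h; rfl
    | _ + 1 => simp [pvCombs] at h
  | cons x xs ih =>
    match L with
    | 0 => simp only [pvCombs, List.mem_singleton] at h; subst h; rfl
    | L + 1 =>
      simp only [pvCombs, List.mem_append, List.mem_map] at h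
      rcases h with ⟨t, ht, rfl⟩ | h
      · simp [ih ht]
      · exact ih h

theorem pvCombs_replicate (L b : Nat) (c : String) :
    pvCombs L (List.replicate b c) = List.replicate (b.choose L) (List.replicate L c) := by
  induction b generalizing L with
  | zero =>
    match L with
    | 0 => rfl
    | L + 1 => rfl
  | succ b ih =>
    match L with
    | 0 => rfl
    | L + 1 =>
      rw [List.replicate_succ, pvCombs, ih L, ih (L + 1), List.map_replicate,
        ← List.replicate_succ, ← List.replicate_add,
        Nat.choose_succ_succ]

/-- The count-pair list of all length-`L` subsets of `a` R's followed by `b` B's. -/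
def pvCl (a b L : Nat) : List (Int × Int) :=
  (pvCombs L (List.replicate a "R" ++ List.replicate b "B")).map pvCnt

theorem pvCnt_replicate_B (L : Nat) :
    pvCnt (List.replicate L "B") = ((0 : Int), (L : Int)) := by
  simp [pvCnt, List.count_replicate]

theorem pvCl_zero_left (b L : Nat) :
    pvCl 0 b L = List.replicate (b.choose L) ((0 : Int), (L : Int)) := by
  rw [pvCl, List.replicate_zero, List.nil_append, pvCombs_replicate,
    List.map_replicate, pvCnt_replicate_B]

theorem pvCnt_cons_R (s : List String) :
    pvCnt ("R" :: s) = ((pvCnt s).1 + 1, (pvCnt s).2) := by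
  simp [pvCnt]

theorem pvCl_succ (a b L : Nat) :
    pvCl (a + 1) b (L + 1) =
      (pvCl a b L).map (fun p => (p.1 + 1, p.2)) ++ pvCl a b (L + 1) := by
  unfold pvCl
  rw [List.replicate_succ, List.cons_append, pvCombs, List.map_append,
    List.map_map]
  congr 1
  rw [List.map_map]
  apply List.map_congr_left
  intro t _
  simp [Function.comp, pvCnt_cons_R]

theorem pvCombs_zero (xs : List String) : pvCombs 0 xs = [[]] := by
  cases xs <;> rfl

theorem pvCl_zero_L (a b : Nat) : pvCl a b 0 = [((0 : Int), (0 : Int))] := by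
  simp [pvCl, pvCombs_zero, pvCnt]

theorem mem_pvCl {a b L : Nat} {t : Int × Int} :
    t ∈ pvCl a b L ↔ 0 ≤ t.1 ∧ 0 ≤ t.2 ∧ t.1 + t.2 = (L : Int) ∧ t.1 ≤ (a : Int) ∧ t.2 ≤ (b : Int) := by
  obtain ⟨t1, t2⟩ := t
  induction a generalizing L t1 t2 with
  | zero =>
    rw [pvCl_zero_left, List.mem_replicate]
    simp only [ne_eq, Nat.choose_eq_zero_iff, not_lt, Prod.mk.injEq]
    constructor
    · rintro ⟨hbl, rfl, rfl⟩
      refine ⟨le_refl _, by positivity, by ring, le_refl _, by exact_mod_cast hbl⟩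
    · rintro ⟨h1, h2, h3, h4, h5⟩
      have ht1 : t1 = 0 := le_antisymm h4 h1
      subst ht1
      have : t2 = (L : Int) := by omega
      subst this
      exact ⟨by exact_mod_cast h5, rfl, rfl⟩
  | succ a ih =>
    match L with
    | 0 =>
      rw [pvCl_zero_L]
      simp only [List.mem_singleton, Prod.mk.injEq]
      constructor
      · rintro ⟨rfl, rfl⟩
        refine ⟨le_refl _, le_refl _, by simp, by positivity, by positivity⟩
      · rintro ⟨h1, h2, h3, h4, h5⟩
        constructor <;> omega
    | L + 1 =>
      rw [pvCl_succ, List.mem_append, List.mem_map]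
      constructor
      · rintro (⟨⟨p1, p2⟩, hp, heq⟩ | h)
        · rw [ih] at hp
          simp only [Prod.mk.injEq] at heq
          obtain ⟨rfl, rfl⟩ := heq
          push_cast at hp ⊢
          omega
        · rw [ih] at h
          push_cast at h ⊢
          omega
      · rintro ⟨h1, h2, h3, h4, h5⟩
        by_cases ht1 : 1 ≤ t1
        · left
          refine ⟨(t1 - 1, t2), ?_, by simp⟩
          rw [ih]
          push_cast at h3 h4 h5 ⊢
          omega
        · right
          rw [ih]
          push_cast at h3 h4 h5 ⊢
          omega

-- first-occurrence lemmas ----------------------------------------------------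

theorem pvFirstOccs_filter {α : Type} [DecidableEq α] (p : α → Bool) (l : List α) :
    pvFirstOccs (l.filter p) = (pvFirstOccs l).filter p := by
  obtain ⟨n, hn⟩ : ∃ n, l.length ≤ n := ⟨l.length, le_refl _⟩
  induction n generalizing l with
  | zero =>
    obtain rfl : l = [] := List.length_eq_zero_iff.mp (Nat.le_zero.mp hn)
    rw [List.filter_nil, pvFirstOccs, List.filter_nil]
  | succ n ih =>
    match l with
    | [] => rw [List.filter_nil, pvFirstOccs, List.filter_nil]
    | x :: l =>
      have hlen : ∀ (q : α → Bool), (l.filter q).length ≤ n := by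
        intro q
        have h1 := List.length_filter_le q l
        simp only [List.length_cons, Nat.succ_le_succ_iff] at hn
        omega
      by_cases hp : p x
      · rw [pvFirstOccs, List.filter_cons_of_pos hp, pvFirstOccs,
          List.filter_filter, List.filter_cons_of_pos hp]
        congr 1
        rw [← ih _ (hlen _)]
        congr 1
        rw [List.filter_filter]
        apply List.filter_congr
        intro y _
        rw [Bool.and_comm]
      · rw [pvFirstOccs, List.filter_cons_of_neg hp, List.filter_cons_of_neg hp,
          ← ih _ (hlen _), List.filter_filter]
        have : ∀ y, (p y && decide (y ≠ x)) = p y := by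
          intro y
          by_cases hyx : y = x
          · subst hyx; simp [hp]
          · simp [hyx]
        rw [List.filter_congr (fun y _ => this y)]

theorem pvFirstOccs_append {α : Type} [DecidableEq α] (l₁ l₂ : List α) :
    pvFirstOccs (l₁ ++ l₂) =
      pvFirstOccs l₁ ++ (pvFirstOccs l₂).filter (fun y => y ∉ l₁) := by
  obtain ⟨n, hn⟩ : ∃ n, l₁.length ≤ n := ⟨l₁.length, le_refl _⟩
  induction n generalizing l₁ l₂ with
  | zero =>
    obtain rfl : l₁ = [] := List.length_eq_zero_iff.mp (Nat.le_zero.mp hn)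
    simp only [List.nil_append, pvFirstOccs]
    rw [List.filter_eq_self.mpr (by intro y _; simp)]
  | succ n ih =>
    match l₁ with
    | [] =>
      simp only [List.nil_append, pvFirstOccs]
      rw [List.filter_eq_self.mpr (by intro y _; simp)]
    | x :: l₁ =>
      have hn' : (l₁.filter (· ≠ x)).length ≤ n := by
        have h1 := List.length_filter_le (fun z => decide (z ≠ x)) l₁
        simp only [List.length_cons, Nat.succ_le_succ_iff] at hn
        omega
      rw [List.cons_append, pvFirstOccs, List.filter_append, ih _ _ hn',
        pvFirstOccs, List.cons_append]
      congr 2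
      rw [pvFirstOccs_filter]
      rw [List.filter_filter]
      apply List.filter_congr
      intro y _
      by_cases hyx : y = x
      · subst hyx; simp
      · simp only [List.mem_cons, List.mem_filter, hyx, decide_true,
          decide_not, ne_eq, not_false_iff]
        by_cases hyl : y ∈ l₁ <;> simp [hyl]

theorem pvFirstOccs_map {α β : Type} [DecidableEq α] [DecidableEq β] {f : α → β}
    (hf : Function.Injective f) (l : List α) :
    pvFirstOccs (l.map f) = (pvFirstOccs l).map f := by
  obtain ⟨n, hn⟩ : ∃ n, l.length ≤ n := ⟨l.length, le_refl _⟩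
  induction n generalizing l with
  | zero =>
    obtain rfl : l = [] := List.length_eq_zero_iff.mp (Nat.le_zero.mp hn)
    simp only [pvFirstOccs, List.map_nil]
  | succ n ih =>
    match l with
    | [] => simp only [pvFirstOccs, List.map_nil]
    | x :: l =>
      have hn' : (l.filter (· ≠ x)).length ≤ n := by
        have h1 := List.length_filter_le (fun z => decide (z ≠ x)) l
        simp only [List.length_cons, Nat.succ_le_succ_iff] at hn
        omega
      rw [List.map_cons, pvFirstOccs, pvFirstOccs, List.map_cons]
      congr 1
      rw [← ih _ hn', List.filter_map]
      congr 1
      apply congrArg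
      apply List.filter_congr
      intro y _
      simp only [Function.comp_apply, decide_eq_decide, ne_eq]
      exact not_congr ⟨fun h => hf h, fun h => by rw [h]⟩

theorem pvFirstOccs_const {α : Type} [DecidableEq α] {l : List α} {c : α}
    (h : ∀ y ∈ l, y = c) (hne : l ≠ []) : pvFirstOccs l = [c] := by
  match l with
  | [] => exact absurd rfl hne
  | x :: l =>
    have hx : x = c := h x (List.mem_cons_self)
    subst hx
    rw [pvFirstOccs]
    have : l.filter (· ≠ x) = [] := by
      rw [List.filter_eq_nil_iff]
      intro y hy
      simp [h y (List.mem_cons_of_mem _ hy)]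
    rw [this, pvFirstOccs]

/-- Descending list `[hi, hi-1, …, lo]` (empty when `hi < lo`). -/
def pvDesc (lo hi : Int) : List Int := (PySem.List.pyRange lo (hi + 1) 1).reverse

theorem pvDesc_nil {lo hi : Int} (h : hi < lo) : pvDesc lo hi = [] := by
  rw [pvDesc, PySem.List.pyRange_one_eq_nil (by omega), List.reverse_nil]

theorem pvDesc_cons_bottom {lo hi : Int} (h : lo ≤ hi) :
    pvDesc lo hi = pvDesc (lo + 1) hi ++ [lo] := by
  rw [pvDesc, PySem.List.pyRange_one_cons (by omega), List.reverse_cons, pvDesc]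

theorem pvDesc_singleton (lo : Int) : pvDesc lo lo = [lo] := by
  rw [pvDesc_cons_bottom (le_refl _), pvDesc_nil (by omega), List.nil_append]

theorem mem_pvDesc {lo hi r : Int} : r ∈ pvDesc lo hi ↔ lo ≤ r ∧ r ≤ hi := by
  rw [pvDesc, List.mem_reverse, PySem.List.mem_pyRange_one]
  omega

theorem pvDesc_map_add_one (lo hi : Int) :
    (pvDesc lo hi).map (· + 1) = pvDesc (lo + 1) (hi + 1) := by
  rw [pvDesc, pvDesc, List.map_reverse]
  congr 1
  rw [PySem.List.pyRange_one, PySem.List.pyRange_one, List.map_map]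
  have hc : (hi + 1 + 1 - (lo + 1)).toNat = (hi + 1 - lo).toNat := by omega
  rw [hc]
  apply List.map_congr_left
  intro k _
  simp [Function.comp]
  omega

theorem pvIncInj : Function.Injective (fun p : Int × Int => (p.1 + 1, p.2)) := by
  rintro ⟨x1, x2⟩ ⟨y1, y2⟩ h
  simp only [Prod.mk.injEq] at h
  obtain ⟨h1, h2⟩ := h
  simp only [Prod.mk.injEq]
  omega

theorem mem_pvClInc {a b L : Nat} {y : Int × Int} :
    y ∈ (pvCl a b L).map (fun p => (p.1 + 1, p.2)) ↔
      1 ≤ y.1 ∧ 0 ≤ y.2 ∧ y.1 + y.2 = (L : Int) + 1 ∧ y.1 ≤ (a : Int) + 1 ∧ y.2 ≤ (b : Int) := by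
  obtain ⟨y1, y2⟩ := y
  rw [List.mem_map]
  constructor
  · rintro ⟨⟨p1, p2⟩, hp, heq⟩
    rw [mem_pvCl] at hp
    simp only [Prod.mk.injEq] at heq
    dsimp only at hp ⊢
    omega
  · rintro ⟨h1, h2, h3, h4, h5⟩
    refine ⟨(y1 - 1, y2), ?_, by simp⟩
    rw [mem_pvCl]
    dsimp only
    omega

theorem pvFirstOccs_pvCl (a b L : Nat) :
    pvFirstOccs (pvCl a b L) =
      (pvDesc (max 0 ((L : Int) - (b : Int))) (min (L : Int) (a : Int))).map
        (fun r => (r, (L : Int) - r)) := by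
  induction a generalizing L with
  | zero =>
    by_cases hLb : L ≤ b
    · rw [pvCl_zero_left, pvFirstOccs_const (c := ((0 : Int), (L : Int)))
        (fun y hy => List.eq_of_mem_replicate hy)
        (by simp [Nat.choose_eq_zero_iff]; omega)]
      have h1 : max 0 ((L : Int) - (b : Int)) = 0 := by omega
      have h2 : min (L : Int) ((0 : Nat) : Int) = 0 := by simp
      rw [h1, h2, pvDesc_singleton]
      simp
    · rw [pvCl_zero_left, Nat.choose_eq_zero_iff.mpr (by omega), List.replicate_zero,
        pvFirstOccs]
      rw [pvDesc_nil (by simp; omega), List.map_nil]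
  | succ a ih =>
    match L with
    | 0 =>
      rw [pvCl_zero_L, pvFirstOccs_const (c := ((0 : Int), (0 : Int))) (by simp) (by simp)]
      have h1 : max 0 (((0 : Nat) : Int) - (b : Int)) = 0 := by simp
      have h2 : min ((0 : Nat) : Int) (((a + 1 : Nat)) : Int) = 0 := by push_cast; omega
      rw [h1, h2, pvDesc_singleton]
      simp
    | L + 1 =>
      rw [pvCl_succ, pvFirstOccs_append, pvFirstOccs_map pvIncInj, ih, ih]
      have hA : ((pvDesc (max 0 ((L : Int) - (b : Int))) (min (L : Int) (a : Int))).map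
          (fun r => (r, (L : Int) - r))).map (fun p => (p.1 + 1, p.2)) =
          (pvDesc (max 0 ((L : Int) - (b : Int)) + 1) (min (L : Int) (a : Int) + 1)).map
            (fun r => (r, (L : Int) + 1 - r)) := by
        rw [List.map_map, ← pvDesc_map_add_one, List.map_map]
        apply List.map_congr_left
        intro r _
        simp [Function.comp_apply]
      have hcast1 : (((L + 1 : Nat)) : Int) = (L : Int) + 1 := by push_cast; ring
      have hcast2 : (((a + 1 : Nat)) : Int) = (a : Int) + 1 := by push_cast; ring
      rw [hcast1, hcast2, hA]
      rw [List.filter_map]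
      rw [List.filter_congr (q := fun r : Int => decide (r < 1))
        (fun r hr => by
          rw [mem_pvDesc] at hr
          simp only [Function.comp_apply]
          exact decide_eq_decide.mpr (by rw [mem_pvClInc]; dsimp only; omega))]
      by_cases hb : L + 1 ≤ b
      · rw [show max 0 ((L : Int) + 1 - (b : Int)) = 0 from by omega,
          show max 0 ((L : Int) - (b : Int)) = 0 from by omega,
          show min ((L : Int) + 1) ((a : Int) + 1) = min (L : Int) (a : Int) + 1 from by omega]
        rw [pvDesc_cons_bottom (show (0 : Int) ≤ min ((L : Int) + 1) (a : Int) from by omega)]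
        rw [List.filter_append]
        have hnil : (pvDesc (0 + 1) (min ((L : Int) + 1) (a : Int))).filter
            (fun r : Int => decide (r < 1)) = [] := by
          rw [List.filter_eq_nil_iff]
          intro r hr
          rw [mem_pvDesc] at hr
          simp only [decide_eq_true_eq]
          omega
        have hone : ([(0 : Int)]).filter (fun r : Int => decide (r < 1)) = [(0 : Int)] := by decide
        rw [hnil, hone, List.nil_append, ← List.map_append,
          ← pvDesc_cons_bottom (show (0 : Int) ≤ min (L : Int) (a : Int) + 1 from by omega)]
      · have hnil : (pvDesc (max 0 ((L : Int) + 1 - (b : Int))) (min ((L : Int) + 1) (a : Int))).filter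
            (fun r : Int => decide (r < 1)) = [] := by
          rw [List.filter_eq_nil_iff]
          intro r hr
          rw [mem_pvDesc] at hr
          simp only [decide_eq_true_eq]
          omega
        rw [hnil, List.map_nil, List.append_nil,
          show max 0 ((L : Int) - (b : Int)) + 1 = max 0 ((L : Int) + 1 - (b : Int)) from by omega,
          show min ((L : Int) + 1) ((a : Int) + 1) = min (L : Int) (a : Int) + 1 from by omega]

-- state-machine lemmas -------------------------------------------------------

theorem pvStepT_frozen {L : Int} {st : PvSt} (h : st.stop = true) (l : List (Int × Int)) :
    l.foldl (pvStepT L) st = st := by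
  induction l with
  | nil => rfl
  | cons x l ih => simpa [pvStepT, h] using ih

theorem pvStepT_low {L : Int} {st : PvSt} (h : st.R + st.B < L) (l : List (Int × Int)) :
    pvEqCore (l.foldl (pvStepT L) st) st := by
  induction l generalizing st with
  | nil => exact pvEqCore_refl st
  | cons x l ih =>
    by_cases hs : st.stop
    · rw [List.foldl_cons]
      have hx : pvStepT L st x = st := by simp [pvStepT, hs]
      rw [hx]; exact ih h
    · have hx : pvStepT L st x = { st with stop := true } := by
        simp only [pvStepT, hs, if_false, Bool.false_eq_true]
        rw [if_pos (Or.inl h)]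
      rw [List.foldl_cons, hx, pvStepT_frozen rfl]
      exact pvEqCore_refl _

theorem pvStepBSh_low {L : Int} {st : PvSt} (h : st.R + st.B < L) (l : List Int) :
    l.foldl (pvStepBSh L) st = st := by
  induction l with
  | nil => rfl
  | cons r l ih =>
    have hx : pvStepBSh L st r = st := by
      unfold pvStepBSh
      rw [if_neg]
      rintro ⟨-, h1, h2⟩; omega
    rw [List.foldl_cons, hx, ih]

def pvDead (st : PvSt) (t : Int × Int) : Prop :=
  t ∈ st.combos ∨ st.R < t.1 ∨ st.B < t.2

theorem pvDead_persist {L : Int} {st : PvSt} {t u : Int × Int}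
    (hu : 0 ≤ u.1 ∧ 0 ≤ u.2) (h : pvDead st t) : pvDead (pvStepT L st u) t := by
  unfold pvDead pvStepT at *
  split_ifs with h1 h2 h3
  · exact h
  · exact h
  · rcases h with h | h | h
    · exact Or.inl (by simpa [PySem.Set.mem_add] using Or.inl h)
    · exact Or.inr (Or.inl (by dsimp only; omega))
    · exact Or.inr (Or.inr (by dsimp only; omega))
  · exact h

theorem pvStepT_last {L : Int} {st : PvSt} {u : Int × Int} (h : L ≤ st.last + 2) :
    L ≤ (pvStepT L st u).last + 2 := by
  unfold pvStepT
  split_ifs <;> first | omega | (dsimp only; omega)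

theorem pvSkip {L : Int} (l : List (Int × Int)) (st : PvSt) (t : Int × Int)
    (hd : pvDead st t) (hl : L ≤ st.last + 2)
    (hnn : ∀ u ∈ l, 0 ≤ u.1 ∧ 0 ≤ u.2) :
    pvRel L (l.foldl (pvStepT L) st) ((l.filter (· ≠ t)).foldl (pvStepT L) st) := by
  induction l generalizing st with
  | nil => exact pvRel_refl _ _
  | cons y l ih =>
    by_cases hs : st.stop
    · rw [pvStepT_frozen hs, pvStepT_frozen hs]
      exact pvRel_refl _ _
    · have hs' : st.stop = false := by simpa using hs
      by_cases hyt : y = t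
      · subst hyt
        have hf : (y :: l).filter (· ≠ y) = l.filter (· ≠ y) := by simp
        rw [hf, List.foldl_cons]
        by_cases hg : st.R + st.B < L ∨ L > st.last + 2
        · have hRB : st.R + st.B < L := by rcases hg with h | h; exacts [h, by omega]
          have hy : pvStepT L st y = { st with stop := true } := by
            unfold pvStepT; rw [if_neg hs, if_pos hg]
          rw [hy, pvStepT_frozen rfl]
          have hc := pvStepT_low (st := st) hRB (l.filter (· ≠ y))
          exact ⟨pvEqCore_symm hc, Or.inr hRB⟩
        · have hy : pvStepT L st y = st := by
            unfold pvStepT; rw [if_neg hs, if_neg hg, if_neg]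
            rintro ⟨h1, h2, h3⟩
            rcases hd with hd | hd | hd
            · exact h1 hd
            · omega
            · omega
          rw [hy]
          exact ih st hd hl (fun u hu => hnn u (List.mem_cons_of_mem _ hu))
      · have hf : (y :: l).filter (· ≠ t) = y :: l.filter (· ≠ t) := by simp [hyt]
        rw [hf, List.foldl_cons, List.foldl_cons]
        exact ih (pvStepT L st y)
          (pvDead_persist (hnn y (List.mem_cons_self)) hd)
          (pvStepT_last hl)
          (fun u hu => hnn u (List.mem_cons_of_mem _ hu))

theorem pvDedup {L : Int} (l : List (Int × Int)) (st : PvSt)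
    (hs : st.stop = false) (hg : ¬(st.R + st.B < L ∨ L > st.last + 2))
    (hnn : ∀ u ∈ l, 0 ≤ u.1 ∧ 0 ≤ u.2) :
    pvRel L (l.foldl (pvStepT L) st) ((pvFirstOccs l).foldl (pvStepT L) st) := by
  obtain ⟨n, hn⟩ : ∃ n, l.length ≤ n := ⟨l.length, le_refl _⟩
  induction n generalizing l st with
  | zero =>
    obtain rfl : l = [] := List.length_eq_zero_iff.mp (Nat.le_zero.mp hn)
    rw [pvFirstOccs]; exact pvRel_refl _ _
  | succ n ih =>
    match l with
    | [] => rw [pvFirstOccs]; exact pvRel_refl _ _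
    | x :: l =>
      have hn' : (l.filter (· ≠ x)).length ≤ n := by
        have h1 := List.length_filter_le (fun y => decide (y ≠ x)) l
        simp only [List.length_cons, Nat.succ_le_succ_iff] at hn
        omega
      rw [pvFirstOccs, List.foldl_cons, List.foldl_cons]
      set st' := pvStepT L st x with hst'
      have hstop' : st'.stop = false := by
        rw [hst']; unfold pvStepT; rw [if_neg (by simp [hs]), if_neg hg]
        split_ifs <;> simpa using hs
      have hdead : pvDead st' x := by
        rw [hst']; unfold pvStepT; rw [if_neg (by simp [hs]), if_neg hg]
        split_ifs with hc
        · exact Or.inl (by simp [PySem.Set.mem_add])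
        · by_cases hm : x ∈ st.combos
          · exact Or.inl hm
          · by_cases hr : x.1 ≤ st.R
            · have hb : ¬ x.2 ≤ st.B := fun hb => hc ⟨hm, hr, hb⟩
              exact Or.inr (Or.inr (by omega))
            · exact Or.inr (Or.inl (by omega))
      by_cases hg' : st'.R + st'.B < L ∨ L > st'.last + 2
      · have hRB : st'.R + st'.B < L := by
          rcases hg' with h | h
          · exact h
          · exfalso
            rw [hst'] at h; unfold pvStepT at h
            rw [if_neg (by simp [hs]), if_neg hg] at h
            split_ifs at h with hc
            · simp at h
            · omega
        have h1 := pvStepT_low (st := st') hRB l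
        have h2 := pvStepT_low (st := st') hRB (pvFirstOccs (l.filter (· ≠ x)))
        exact ⟨pvEqCore_trans h1 (pvEqCore_symm h2), Or.inr (by obtain ⟨_, e2, e3, _⟩ := h1; omega)⟩
      · have hlast : L ≤ st'.last + 2 := by omega
        have h1 := pvSkip l st' x hdead hlast
          (fun u hu => hnn u (List.mem_cons_of_mem _ hu))
        have h2 := ih (l.filter (· ≠ x)) st' hstop' hg'
          (fun u hu => hnn u (List.mem_cons_of_mem _ (List.mem_of_mem_filter hu))) hn'
        exact pvRel_trans h1 h2

theorem pvTB {L : Int} (rs : List Int) (st : PvSt)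
    (hs : st.stop = false) (hg : ¬(st.R + st.B < L ∨ L > st.last + 2)) :
    pvRel L ((rs.map (fun r => (r, L - r))).foldl (pvStepT L) st)
            (rs.foldl (pvStepBSh L) st) := by
  induction rs generalizing st with
  | nil => exact pvRel_refl _ _
  | cons r rs ih =>
    rw [List.map_cons, List.foldl_cons, List.foldl_cons]
    have hstep : pvStepT L st (r, L - r) = pvStepBSh L st r := by
      unfold pvStepT pvStepBSh
      rw [if_neg (by simp [hs]), if_neg hg]
    rw [hstep]
    set st' := pvStepBSh L st r with hst'
    have hstop' : st'.stop = false := by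
      rw [hst']; unfold pvStepBSh; split_ifs <;> simpa using hs
    by_cases hg' : st'.R + st'.B < L ∨ L > st'.last + 2
    · have hRB : st'.R + st'.B < L := by
        rcases hg' with h | h
        · exact h
        · exfalso
          rw [hst'] at h; unfold pvStepBSh at h
          split_ifs at h with hc
          · simp at h
          · omega
      have h1 := pvStepT_low (st := st') hRB (rs.map (fun r => (r, L - r)))
      have h2 := pvStepBSh_low (st := st') hRB rs
      rw [h2]
      exact ⟨h1, Or.inr (by obtain ⟨_, e2, e3, _⟩ := h1; omega)⟩
    · exact ih st' hstop' hg' 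

-- outer loop -----------------------------------------------------------------

theorem pvStepA_frozen {st : PvSt} (h : st.stop = true) (l : List (List String)) :
    l.foldl pvStepA st = st := by
  induction l with
  | nil => rfl
  | cons x l ih => simpa [pvStepA, h] using ih

theorem pvFoldA_eq_foldT (s : Nat) (l : List (List String))
    (hl : ∀ x ∈ l, x.length = s) (st : PvSt) :
    l.foldl pvStepA st = (l.map pvCnt).foldl (pvStepT (s : Int)) st := by
  induction l generalizing st with
  | nil => rfl
  | cons x l ih =>
    rw [List.map_cons, List.foldl_cons, List.foldl_cons, pvStepA_eq_stepT,
      hl x (List.mem_cons_self)]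
    exact ih (fun y hy => hl y (List.mem_cons_of_mem _ hy)) _

theorem pvStepA_low {s : Nat} {letters : List String} {st : PvSt}
    (h : st.R + st.B < (s : Int)) :
    pvEqCore ((pvCombs s letters).foldl pvStepA st) st := by
  rw [pvFoldA_eq_foldT s _ (fun x hx => pvCombs_length hx)]
  exact pvStepT_low h _

/-- B's inner `range(min(L,R0), max(0,L-B0)-1, -1)` is the descending list. -/
theorem pvRangeB (L R0 B0 : Int) :
    PySem.List.pyRange (min L R0) (max 0 (L - B0) - 1) (-1) =
      pvDesc (max 0 (L - B0)) (min L R0) := by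
  rw [PySem.List.pyRange_neg_one_eq_reverse, pvDesc]
  congr 2
  omega

/-- One outer iteration: A's processing of length `s` matches B's. -/
theorem pvOuterStep (a b s : Nat) (hs : s ≤ a + b) (st stB : PvSt)
    (h : pvRel (s : Int) st stB) :
    pvRel ((s : Int) + 1)
      ((pvCombs s (List.replicate a "R" ++ List.replicate b "B")).foldl pvStepA st)
      (pvLenBSh (a : Int) (b : Int) stB (s : Int)) := by
  obtain ⟨hcore, hstop⟩ := h
  by_cases hsA : st.stop
  · rw [pvStepA_frozen hsA]
    by_cases hsB : stB.stop
    · have hB : pvLenBSh (a : Int) (b : Int) stB (s : Int) = stB := by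
        unfold pvLenBSh; rw [if_pos hsB]
      rw [hB]
      exact ⟨hcore, Or.inl (by rw [hsA, hsB])⟩
    · have hlow : st.R + st.B < (s : Int) := by
        rcases hstop with he | hl
        · rw [hsA] at he; simp [← he] at hsB
        · exact hl
      have hB : pvLenBSh (a : Int) (b : Int) stB (s : Int) = { stB with stop := true } := by
        unfold pvLenBSh
        rw [if_neg hsB, if_pos (Or.inl (by obtain ⟨_, e2, e3, _⟩ := hcore; omega))]
      rw [hB]
      exact ⟨hcore, Or.inl (by rw [hsA])⟩
  · by_cases hsB : stB.stop
    · have hlow : st.R + st.B < (s : Int) := by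
        rcases hstop with he | hl
        · rw [hsB] at he; simp [he] at hsA
        · exact hl
      have hB : pvLenBSh (a : Int) (b : Int) stB (s : Int) = stB := by
        unfold pvLenBSh; rw [if_pos hsB]
      rw [hB]
      have hA := pvStepA_low (s := s) (letters := List.replicate a "R" ++ List.replicate b "B")
        (st := st) hlow
      refine ⟨pvEqCore_trans hA hcore, Or.inr ?_⟩
      obtain ⟨_, e2, e3, _⟩ := hA
      omega
    · have hsA' : st.stop = false := by simpa using hsA
      have hEq : stB = st := by
        obtain ⟨e1, e2, e3, e4⟩ := hcore
        cases st; cases stB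
        simp only at e1 e2 e3 e4 hsA hsB ⊢
        simp_all
      subst hEq
      -- the first length-`s` subset (it exists since s ≤ a + b)
      have hmem : ((min (s : Int) (a : Int)), (s : Int) - min (s : Int) (a : Int)) ∈ pvCl a b s :=
        mem_pvCl.mpr (by dsimp only; omega)
      have hne : pvCombs s (List.replicate a "R" ++ List.replicate b "B") ≠ [] := by
        intro hnil
        rw [pvCl, hnil] at hmem
        simp at hmem
      by_cases hg : stB.R + stB.B < (s : Int) ∨ (s : Int) > stB.last + 2
      · have hB : pvLenBSh (a : Int) (b : Int) stB (s : Int) = { stB with stop := true } := by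
          unfold pvLenBSh; rw [if_neg hsA, if_pos hg]
        obtain ⟨sub, rest, hsr⟩ := List.exists_cons_of_ne_nil hne
        have hlen : sub.length = s := pvCombs_length (by rw [hsr]; exact List.mem_cons_self)
        rw [hB, hsr, List.foldl_cons]
        have hstep : pvStepA stB sub = { stB with stop := true } := by
          rw [pvStepA_eq_stepT, hlen]
          unfold pvStepT
          rw [if_neg hsA, if_pos hg]
        rw [hstep, pvStepA_frozen rfl]
        exact ⟨pvEqCore_refl _, Or.inl rfl⟩
      · have hB : pvLenBSh (a : Int) (b : Int) stB (s : Int) =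
            (pvDesc (max 0 ((s : Int) - (b : Int))) (min (s : Int) (a : Int))).foldl
              (pvStepBSh (s : Int)) stB := by
          unfold pvLenBSh
          rw [if_neg hsA, if_neg hg, pvRangeB]
        rw [hB, pvFoldA_eq_foldT s _ (fun x hx => pvCombs_length hx)]
        have hnn : ∀ u ∈ pvCl a b s, 0 ≤ u.1 ∧ 0 ≤ u.2 := fun u hu => by
          rw [mem_pvCl] at hu
          exact ⟨hu.1, hu.2.1⟩
        have h1 := pvDedup (L := (s : Int)) (pvCl a b s) stB hsA' hg hnn
        have h2 : pvRel (s : Int)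
            ((pvFirstOccs (pvCl a b s)).foldl (pvStepT (s : Int)) stB)
            ((pvDesc (max 0 ((s : Int) - (b : Int))) (min (s : Int) (a : Int))).foldl
              (pvStepBSh (s : Int)) stB) := by
          rw [pvFirstOccs_pvCl]
          exact pvTB _ stB hsA' hg
        exact pvRel_mono (by omega) (pvRel_trans h1 h2)

/-- The whole outer loop, by induction on the number of remaining lengths. -/
theorem pvOuterAll (a b c s : Nat) (hc : s + c ≤ a + b + 1) (st stB : PvSt)
    (h : pvRel (s : Int) st stB) :
    pvRel (((s + c : Nat)) : Int)
      ((List.range' s c).foldl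
        (fun st L => (pvCombs L (List.replicate a "R" ++ List.replicate b "B")).foldl pvStepA st) st)
      (((List.range' s c).map (fun k : Nat => (k : Int))).foldl (pvLenBSh (a : Int) (b : Int)) stB) := by
  induction c generalizing s st stB with
  | zero => simpa using h
  | succ c ih =>
    rw [List.range'_succ, List.map_cons, List.foldl_cons, List.foldl_cons]
    have hstep := pvOuterStep a b s (by omega) st stB h
    have hcast : ((s : Int)) + 1 = (((s + 1 : Nat)) : Int) := by push_cast; ring
    rw [hcast] at hstep
    have := ih (s + 1) (by omega) _ _ hstep
    rwa [show s + 1 + c = s + (c + 1) from by omega] at this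

theorem pvMain (s0 s1 : Int) (rest : List Int) :
    getCombinations2 (s0 :: s1 :: rest) = getCombinations2_alt (s0 :: s1 :: rest) := by
  have hget0 : PySem.List.pyGet? (s0 :: s1 :: rest) 0 = some s0 :=
    PySem.List.pyGet?_zero_cons _ _
  have hget1 : PySem.List.pyGet? (s0 :: s1 :: rest) 1 = some s1 := by simp
  unfold getCombinations2 getCombinations2_alt
  rw [hget0, hget1]
  dsimp only
  rw [show (⟨false, [], s0, s1, 1⟩ : PvStB) = pvMk ⟨false, [], s0, s1, 1⟩ from rfl,
    pvFoldLenB_mk]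
  set a := s0.toNat with ha
  set b := s1.toNat with hb
  have hlen : (List.replicate a "R" ++ List.replicate b "B").length = a + b := by simp
  have hR0 : max s0 0 = (a : Int) := by rw [ha]; omega
  have hB0 : max s1 0 = (b : Int) := by rw [hb]; omega
  have hrange : PySem.List.pyRange 0 (max s0 0 + max s1 0 + 1) 1 =
      (List.range' 0 (a + b + 1)).map (fun k : Nat => (k : Int)) := by
    rw [hR0, hB0, PySem.List.pyRange_one, ← List.range_eq_range']
    have : ((a : Int) + (b : Int) + 1 - 0).toNat = a + b + 1 := by omega
    rw [this]
    apply List.map_congr_left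
    intro k _
    omega
  rw [hlen, hrange, ← List.range_eq_range', List.range_eq_range', hR0, hB0]
  have hfuse : ∀ (l : List Nat) (st : PvSt),
      l.foldl (fun st L => pvFoldCombs id L (List.replicate a "R" ++ List.replicate b "B") st) st =
      l.foldl (fun st L => (pvCombs L (List.replicate a "R" ++ List.replicate b "B")).foldl pvStepA st) st := by
    intro l
    induction l with
    | nil => intro st; rfl
    | cons L l ih =>
      intro st
      rw [List.foldl_cons, List.foldl_cons, pvFoldCombs_eq, List.map_id, ih]
  rw [hfuse]
  have h := pvOuterAll a b (a + b + 1) 0 (by omega)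
    ⟨false, [], s0, s1, 1⟩ ⟨false, [], s0, s1, 1⟩ (pvRel_refl _ _)
  obtain ⟨⟨hcombos, _, _, _⟩, _⟩ := h
  exact hcombos

-- ===== VERDICT (by name: the statement is the Claim_ definition above) =====
theorem getCombinations2_spec : Claim_equal_getCombinations2 := by
  intro saws _ hpre
  unfold Spec_getCombinations2
  match saws with
  | [] => simp [Pre_getCombinations2] at hpre
  | [x] => simp [Pre_getCombinations2] at hpre
  | x :: y :: rest => exact pvMain x y rest
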